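-- pv_equiv track=rewrite | github.com/chiseungii/Algorithm_Study | 프로그래머스/월간 코드 챌린지 시즌3/공 이동 시뮬레이션/공 이동 시뮬레이션.py | solution
-- ===== SOURCE A (Python) =====
-- def solution(n, m, x, y, queries):
--     start = [x, y]
--     end = [x, y]
--
--     for i in range(len(queries)-1, -1, -1):
--         dir,dist = queries[i][0],queries[i][1]
--
--         if dir == 0:
--             if start[1] != 0: start[1] += dist
--
--             end[1] += dist
--             if end[1] >= m: end[1] = m-1
--         elif dir == 1:
--             start[1] -= dist
--             if start[1] < 0: start[1] = 0
--
--             if end[1] != m-1: end[1] -= dist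
--         elif dir == 2:
--             if start[0] != 0: start[0] += dist
--
--             end[0] += dist
--             if end[0] >= n: end[0] = n-1
--         else:
--             start[0] -= dist
--             if start[0] < 0: start[0] = 0
--
--             if end[0] != n-1: end[0] -= dist
--
--         if start[0]>=n or end[0]<0 or start[1]>=m or end[1]<0:
--             return 0
--
--     return (end[0]-start[0]+1)*(end[1]-start[1]+1)
-- ===== SOURCE B (Python) =====
-- def solution(n, m, x, y, queries):
--     def trajectory(size, pos, steps):
--         states = [(pos, pos)]
--         lo = hi = pos
--         for grow, dist in steps:
--             if grow:
--                 if lo != 0: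
--                     lo += dist
--                 hi += dist
--                 if hi >= size:
--                     hi = size - 1
--             else:
--                 lo -= dist
--                 if lo < 0:
--                     lo = 0
--                 if hi != size - 1:
--                     hi -= dist
--             states.append((lo, hi))
--         return states
--
--     rev = queries[::-1]
--     tx = trajectory(n, x, [(q[0] == 2, q[1]) for q in rev if q[0] not in (0, 1)])
--     ty = trajectory(m, y, [(q[0] == 0, q[1]) for q in rev if q[0] in (0, 1)])
--     ix = iy = 0
--     for q in rev:
--         if q[0] in (0, 1):
--             iy += 1
--         else:
--             ix += 1
--         if tx[ix][0] >= n or tx[ix][1] < 0 or ty[iy][0] >= m or ty[iy][1] < 0: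
--             return 0
--     return (tx[-1][1] - tx[-1][0] + 1) * (ty[-1][1] - ty[-1][0] + 1)
-- ===== Notes on version B (the rewrite author's own statement) =====
-- stated objective: alternative
-- what changed: Replaces the single coupled reverse simulation over a 4-field board state by a two-phase algorithm: each axis's interval trajectory (the list of its states) is precomputed independently, then one merge scan over the reversed queries replays the timeline with two counters to find the first moment the board is empty; Pre_ excludes queries with fewer than two entries, on which both Pythons raise IndexError (A may instead early-return 0 when an earlier reversed query already empties the board, while B inspects every query up front and raises).
-- outside the precondition, e.g. on solution(1, 2, 0, 0, [[2], [1, 5]]): A returns 0, B raises IndexError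
import Mathlib
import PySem

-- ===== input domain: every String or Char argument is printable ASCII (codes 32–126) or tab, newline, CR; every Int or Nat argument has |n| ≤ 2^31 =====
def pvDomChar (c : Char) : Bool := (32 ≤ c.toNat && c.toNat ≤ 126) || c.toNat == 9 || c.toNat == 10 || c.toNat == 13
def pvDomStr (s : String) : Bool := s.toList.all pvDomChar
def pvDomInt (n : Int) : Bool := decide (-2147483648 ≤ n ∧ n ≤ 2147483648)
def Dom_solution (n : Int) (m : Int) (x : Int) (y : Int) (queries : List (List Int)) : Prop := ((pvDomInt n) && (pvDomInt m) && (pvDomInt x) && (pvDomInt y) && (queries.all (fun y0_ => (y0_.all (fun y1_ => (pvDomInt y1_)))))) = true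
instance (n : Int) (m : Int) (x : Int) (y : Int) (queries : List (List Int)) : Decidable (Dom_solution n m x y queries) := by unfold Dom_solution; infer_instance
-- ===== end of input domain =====

-- B replaces A's coupled one-pass board simulation by precomputed per-axis interval
-- trajectories plus a merge scan over the timeline (alternative algorithm, same cost).

-- ===== PORT A =====
-- one iteration of A's reverse loop; `none` = A has returned 0 (early return)
def pvAStep (n : Int) (m : Int) (st : Option (Int × Int × Int × Int)) (q : List Int) :
    Option (Int × Int × Int × Int) :=
  match st with
  | none => none
  | some (sx, sy, ex, ey) =>
    let dir := PySem.List.pyGetD q 0 0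
    let dist := PySem.List.pyGetD q 1 0
    let s : Int × Int × Int × Int :=
      if dir = 0 then
        let sy := if sy ≠ 0 then sy + dist else sy
        let ey := ey + dist
        let ey := if ey ≥ m then m - 1 else ey
        (sx, sy, ex, ey)
      else if dir = 1 then
        let sy := sy - dist
        let sy := if sy < 0 then 0 else sy
        let ey := if ey ≠ m - 1 then ey - dist else ey
        (sx, sy, ex, ey)
      else if dir = 2 then
        let sx := if sx ≠ 0 then sx + dist else sx
        let ex := ex + dist
        let ex := if ex ≥ n then n - 1 else ex
        (sx, sy, ex, ey)
      else
        let sx := sx - dist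
        let sx := if sx < 0 then 0 else sx
        let ex := if ex ≠ n - 1 then ex - dist else ex
        (sx, sy, ex, ey)
    if s.1 ≥ n ∨ s.2.2.1 < 0 ∨ s.2.1 ≥ m ∨ s.2.2.2 < 0 then none else some s

def solution (n : Int) (m : Int) (x : Int) (y : Int) (queries : List (List Int)) : Int :=
  match (PySem.List.pyRange ((queries.length : Int) - 1) (-1) (-1)).foldl
      (fun st i => pvAStep n m st (PySem.List.pyGetD queries i [])) (some (x, y, x, y)) with
  | none => 0
  | some (sx, sy, ex, ey) => (ex - sx + 1) * (ey - sy + 1)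

-- ===== PORT B =====
def pvQDir (q : List Int) : Int := PySem.List.pyGetD q 0 0
def pvQIsY (q : List Int) : Bool := pvQDir q == 0 || pvQDir q == 1
def pvQStep (g : Int) (q : List Int) : Bool × Int := (pvQDir q == g, PySem.List.pyGetD q 1 0)

-- the body of B's trajectory loop: one interval move
def pvMove (size : Int) (lo : Int) (hi : Int) (grow : Bool) (dist : Int) : Int × Int :=
  if grow then
    let lo := if lo ≠ 0 then lo + dist else lo
    let hi := hi + dist
    let hi := if hi ≥ size then size - 1 else hi
    (lo, hi)
  else
    let lo := lo - dist
    let lo := if lo < 0 then 0 else lo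
    let hi := if hi ≠ size - 1 then hi - dist else hi
    (lo, hi)

-- B's `trajectory`: the list of interval states, initial state first
def pvTraj (size : Int) (lo : Int) (hi : Int) : List (Bool × Int) → List (Int × Int)
  | [] => [(lo, hi)]
  | (g, d) :: t =>
    (lo, hi) :: pvTraj size (pvMove size lo hi g d).1 (pvMove size lo hi g d).2 t

def pvBad (size : Int) (p : Int × Int) : Bool := decide (p.1 ≥ size ∨ p.2 < 0)

-- B's merge scan; the index counters ix/iy into tx/ty are ported as the tails of
-- tx/ty starting at those indices (current state = head); `true` = B returns 0
def pvMergeLoop (n : Int) (m : Int) : List (List Int) → List (Int × Int) → List (Int × Int) → Bool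
  | [], _, _ => false
  | q :: t, txs, tys =>
    let txs' := if pvQIsY q then txs else txs.tail
    let tys' := if pvQIsY q then tys.tail else tys
    if pvBad n (txs'.headD (0, 0)) || pvBad m (tys'.headD (0, 0)) then true
    else pvMergeLoop n m t txs' tys'

def solution_alt (n : Int) (m : Int) (x : Int) (y : Int) (queries : List (List Int)) : Int :=
  let rv := queries.reverse
  let tx := pvTraj n x x ((rv.filter (fun q => !pvQIsY q)).map (pvQStep 2))
  let ty := pvTraj m y y ((rv.filter pvQIsY).map (pvQStep 0))
  if pvMergeLoop n m rv tx ty then 0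
  else
    let a := tx.getLastD (0, 0)   -- tx[-1]; tx is never empty
    let c := ty.getLastD (0, 0)   -- ty[-1]
    (a.2 - a.1 + 1) * (c.2 - c.1 + 1)

-- ===== PRECONDITION & SPEC =====
-- Pre_ excludes inputs containing a query with fewer than two entries: both Pythons raise
-- IndexError there, except that A may early-return 0 first when an earlier (in reverse
-- order) query already empties the board, while B inspects every query up front and raises.
def Pre_solution (n : Int) (m : Int) (x : Int) (y : Int) (queries : List (List Int)) : Prop :=
  ∀ q ∈ queries, 2 ≤ q.length
instance (n : Int) (m : Int) (x : Int) (y : Int) (queries : List (List Int)) : Decidable (Pre_solution n m x y queries) := by unfold Pre_solution; infer_instance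

def pvWitness_solution : Int × Int × Int × Int × List (List Int) := (2, 2, 0, 0, [[0, 1]])

def Spec_solution (n : Int) (m : Int) (x : Int) (y : Int) (queries : List (List Int)) (out : Int) : Prop := out = solution_alt n m x y queries
instance (n : Int) (m : Int) (x : Int) (y : Int) (queries : List (List Int)) (out : Int) : Decidable (Spec_solution n m x y queries out) := by unfold Spec_solution; infer_instance

-- ===== CLAIM (what is proved, stated in full; the proofs are below) =====
def Claim_equal_solution : Prop := ∀ (n : Int) (m : Int) (x : Int) (y : Int) (queries : List (List Int)), Dom_solution n m x y queries → Pre_solution n m x y queries → Spec_solution n m x y queries (solution n m x y queries)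

-- ===== LEMMAS AND PROOFS =====

theorem pvA_fold_none (n m : Int) (l : List (List Int)) :
    l.foldl (pvAStep n m) none = none := by
  induction l with
  | nil => rfl
  | cons q t ih => simpa [pvAStep] using ih

theorem pvTraj_headD (size lo hi : Int) (steps : List (Bool × Int)) (d : Int × Int) :
    (pvTraj size lo hi steps).headD d = (lo, hi) := by
  cases steps with
  | nil => rfl
  | cons s t => obtain ⟨g, dd⟩ := s; rfl

theorem pvTraj_getLastD (size : Int) (steps : List (Bool × Int)) :
    ∀ (lo hi : Int) (d : Int × Int), (pvTraj size lo hi steps).getLastD d =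
      steps.foldl (fun p gd => pvMove size p.1 p.2 gd.1 gd.2) (lo, hi) := by
  induction steps with
  | nil => intro lo hi d; rfl
  | cons s t ih =>
    obtain ⟨g, dd⟩ := s
    intro lo hi d
    rw [pvTraj, List.foldl_cons, List.getLastD_cons, ih]

theorem pvAStep_Y (n m sx sy ex ey : Int) (q : List Int) (hq : pvQIsY q = true) :
    pvAStep n m (some (sx, sy, ex, ey)) q =
      (if (pvBad n (sx, ex) || pvBad m (pvMove m sy ey (pvQStep 0 q).1 (pvQStep 0 q).2)) = true
       then none
       else some (sx, (pvMove m sy ey (pvQStep 0 q).1 (pvQStep 0 q).2).1, ex,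
                  (pvMove m sy ey (pvQStep 0 q).1 (pvQStep 0 q).2).2)) := by
  simp only [pvQIsY, Bool.or_eq_true, beq_iff_eq, pvQDir] at hq
  rcases hq with h0 | h1
  · simp only [pvAStep, pvMove, pvQStep, pvQDir, pvBad, h0, ite_true, beq_self_eq_true,
      Bool.or_eq_true, decide_eq_true_eq]
    exact if_congr (by tauto) rfl rfl
  · have h0 : ¬ (PySem.List.pyGetD q 0 0 = 0) := by omega
    simp only [pvAStep, pvMove, pvQStep, pvQDir, pvBad, h1, h0, ite_true, ite_false,
      show ((1 : Int) == 0) = false from rfl, Bool.or_eq_true, decide_eq_true_eq]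
    exact if_congr (by tauto) rfl rfl

theorem pvAStep_X (n m sx sy ex ey : Int) (q : List Int) (hq : pvQIsY q = false) :
    pvAStep n m (some (sx, sy, ex, ey)) q =
      (if (pvBad n (pvMove n sx ex (pvQStep 2 q).1 (pvQStep 2 q).2) || pvBad m (sy, ey)) = true
       then none
       else some ((pvMove n sx ex (pvQStep 2 q).1 (pvQStep 2 q).2).1, sy,
                  (pvMove n sx ex (pvQStep 2 q).1 (pvQStep 2 q).2).2, ey)) := by
  simp only [pvQIsY, Bool.or_eq_false_iff, beq_eq_false_iff_ne, ne_eq, pvQDir] at hq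
  obtain ⟨h0, h1⟩ := hq
  by_cases h2 : PySem.List.pyGetD q 0 0 = 2
  · simp only [pvAStep, pvMove, pvQStep, pvQDir, pvBad, h0, h1, h2, ite_true, ite_false,
      show ((2 : Int) == 2) = true from rfl, Bool.or_eq_true, decide_eq_true_eq]
    exact if_congr (by tauto) rfl rfl
  · have h2' : (PySem.List.pyGetD q 0 0 == 2) = false := by simpa using h2
    simp only [pvAStep, pvMove, pvQStep, pvQDir, pvBad, h0, h1, h2, h2', ite_false,
      Bool.or_eq_true, decide_eq_true_eq]
    exact if_congr (by tauto) rfl rfl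

-- the coupled fold of A equals B's merge of the two per-axis trajectories
theorem pvG (n m : Int) (l : List (List Int)) : ∀ (lx hx ly hy : Int),
    l.foldl (pvAStep n m) (some (lx, ly, hx, hy)) =
      (if pvMergeLoop n m l
            (pvTraj n lx hx ((l.filter (fun q => !pvQIsY q)).map (pvQStep 2)))
            (pvTraj m ly hy ((l.filter pvQIsY).map (pvQStep 0)))
       then none
       else some
         ((((l.filter (fun q => !pvQIsY q)).map (pvQStep 2)).foldl
             (fun p gd => pvMove n p.1 p.2 gd.1 gd.2) (lx, hx)).1,
          (((l.filter pvQIsY).map (pvQStep 0)).foldl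
             (fun p gd => pvMove m p.1 p.2 gd.1 gd.2) (ly, hy)).1,
          (((l.filter (fun q => !pvQIsY q)).map (pvQStep 2)).foldl
             (fun p gd => pvMove n p.1 p.2 gd.1 gd.2) (lx, hx)).2,
          (((l.filter pvQIsY).map (pvQStep 0)).foldl
             (fun p gd => pvMove m p.1 p.2 gd.1 gd.2) (ly, hy)).2)) := by
  induction l with
  | nil => intro lx hx ly hy; simp [pvMergeLoop]
  | cons q t ih =>
    intro lx hx ly hy
    by_cases hq : pvQIsY q = true
    · rw [List.foldl_cons, pvAStep_Y n m lx ly hx hy q hq]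
      simp only [List.filter_cons, hq, Bool.not_true, Bool.false_eq_true, ite_false, ite_true,
        List.map_cons, List.foldl_cons, pvQStep]
      rw [show ((pvTraj m ly hy (((pvQDir q == 0), PySem.List.pyGetD q 1 0) ::
            (t.filter pvQIsY).map (pvQStep 0))) =
          (ly, hy) :: pvTraj m (pvMove m ly hy (pvQDir q == 0) (PySem.List.pyGetD q 1 0)).1
            (pvMove m ly hy (pvQDir q == 0) (PySem.List.pyGetD q 1 0)).2
            ((t.filter pvQIsY).map (pvQStep 0))) from rfl]
      rw [pvMergeLoop]
      simp only [hq, ite_true, List.tail_cons]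
      rw [pvTraj_headD, pvTraj_headD]
      cases hbad : (pvBad n (lx, hx) || pvBad m (pvMove m ly hy (pvQDir q == 0) (PySem.List.pyGetD q 1 0))) with
      | true => simp [hbad, pvA_fold_none]
      | false =>
        simp only [hbad, Bool.false_eq_true, ite_false, if_false]
        exact ih lx hx _ _
    · have hq' : pvQIsY q = false := by cases hqq : pvQIsY q <;> simp_all
      rw [List.foldl_cons, pvAStep_X n m lx ly hx hy q hq']
      simp only [List.filter_cons, hq', Bool.not_false, Bool.false_eq_true, ite_false, ite_true,
        List.map_cons, List.foldl_cons, pvQStep]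
      rw [show ((pvTraj n lx hx (((pvQDir q == 2), PySem.List.pyGetD q 1 0) ::
            (t.filter (fun q => !pvQIsY q)).map (pvQStep 2))) =
          (lx, hx) :: pvTraj n (pvMove n lx hx (pvQDir q == 2) (PySem.List.pyGetD q 1 0)).1
            (pvMove n lx hx (pvQDir q == 2) (PySem.List.pyGetD q 1 0)).2
            ((t.filter (fun q => !pvQIsY q)).map (pvQStep 2))) from rfl]
      rw [pvMergeLoop]
      simp only [hq', Bool.false_eq_true, ite_false, List.tail_cons]
      rw [pvTraj_headD, pvTraj_headD]
      cases hbad : (pvBad n (pvMove n lx hx (pvQDir q == 2) (PySem.List.pyGetD q 1 0)) || pvBad m (ly, hy)) with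
      | true => simp [hbad, pvA_fold_none]
      | false =>
        simp only [hbad, Bool.false_eq_true, ite_false, if_false]
        exact ih _ _ ly hy

theorem pvRangeFold (n m x y : Int) (queries : List (List Int)) :
    (PySem.List.pyRange ((queries.length : Int) - 1) (-1) (-1)).foldl
      (fun st i => pvAStep n m st (PySem.List.pyGetD queries i [])) (some (x, y, x, y)) =
    queries.reverse.foldl (pvAStep n m) (some (x, y, x, y)) := by
  have h1 : PySem.List.pyRange ((queries.length : Int) - 1) (-1) (-1)
      = (PySem.List.pyRange 0 (queries.length : Int) 1).reverse := by
    have := PySem.List.pyRange_neg_one_eq_reverse ((queries.length : Int) - 1) (-1)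
    simpa using this
  rw [h1]
  have h2 : (PySem.List.pyRange 0 (queries.length : Int) 1).reverse.map
      (fun j => PySem.List.pyGetD queries j []) = queries.reverse := by
    rw [List.map_reverse]
    congr 1
    exact PySem.List.map_pyGetD_pyRange_zero' queries []
  rw [← h2, List.foldl_map]

-- ===== VERDICT (by name: the statement is the Claim_ definition above) =====
theorem pvAlt_unfold (n m x y : Int) (qs : List (List Int)) :
    solution_alt n m x y qs =
      (if pvMergeLoop n m qs.reverse
            (pvTraj n x x ((qs.reverse.filter (fun q => !pvQIsY q)).map (pvQStep 2)))
            (pvTraj m y y ((qs.reverse.filter pvQIsY).map (pvQStep 0)))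
       then 0
       else
        (((pvTraj n x x ((qs.reverse.filter (fun q => !pvQIsY q)).map (pvQStep 2))).getLastD (0, 0)).2
          - ((pvTraj n x x ((qs.reverse.filter (fun q => !pvQIsY q)).map (pvQStep 2))).getLastD (0, 0)).1 + 1)
          * (((pvTraj m y y ((qs.reverse.filter pvQIsY).map (pvQStep 0))).getLastD (0, 0)).2
          - ((pvTraj m y y ((qs.reverse.filter pvQIsY).map (pvQStep 0))).getLastD (0, 0)).1 + 1)) := rfl

theorem solution_spec : Claim_equal_solution := by
  intro n m x y queries _ _
  unfold Spec_solution solution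
  rw [pvAlt_unfold, pvRangeFold, pvG n m queries.reverse x x y y]
  rw [pvTraj_getLastD, pvTraj_getLastD]
  rcases h : pvMergeLoop n m queries.reverse
      (pvTraj n x x ((queries.reverse.filter (fun q => !pvQIsY q)).map (pvQStep 2)))
      (pvTraj m y y ((queries.reverse.filter pvQIsY).map (pvQStep 0))) with _ | _
  · simp only [Bool.false_eq_true, ite_false]
  · simp only [ite_true]
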